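-- pv_equiv track=rewrite | github.com/cnwinds/stream-workflow-editor | src/stream_workflow_editor/api/services/node_generator.py | _convert_js_json_booleans_to_python
-- ===== SOURCE A (Python) =====
-- def _convert_js_json_booleans_to_python(src: str) -> str:
--     """
--     将源代码中非字符串字面量里的 json/js 布尔 true/false 转为 Python True/False。
--     算法：逐字符扫描，跟踪是否在字符串（支持单引号/双引号，处理转义）。
--     仅在不在字符串中并且前后是非标识符边界时替换单词 true/false。
--
--     这是一个防卫性转换：如果源码已经是 Python 风格（True/False）或者
--     包含字符串 "true"/"false"，则不会误替换字符串内容。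
--     """
--     if not src or ('true' not in src and 'false' not in src):
--         return src
--
--     def is_ident_char(c: str) -> bool:
--         return (c.isalnum() or c == '_')
--
--     i = 0
--     n = len(src)
--     out_chars = []
--     in_string = False
--     string_char = ''
--     escaped = False
--
--     while i < n:
--         ch = src[i]
--
--         # 处理字符串状态与转义
--         if in_string:
--             out_chars.append(ch)
--             if escaped:
--                 escaped = False
--             elif ch == '\\':
--                 escaped = True
--             elif ch == string_char:
--                 in_string = False
--                 string_char = ''
--             i += 1
--             continue
--         else:
--             # 可能进入字符串
--             if ch == '"' or ch == "'":
--                 in_string = True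
--                 string_char = ch
--                 out_chars.append(ch)
--                 i += 1
--                 continue
--
--             # 尝试匹配 true 或 false（完整单词）
--             # 先处理 "true"
--             if src.startswith('true', i):
--                 prev_char = src[i-1] if i-1 >= 0 else ''
--                 next_char = src[i+4] if i+4 < n else ''
--                 if (not prev_char or not is_ident_char(prev_char)) and (not next_char or not is_ident_char(next_char)):
--                     out_chars.append('True')
--                     i += 4
--                     continue
--
--             # 处理 "false"
--             if src.startswith('false', i):
--                 prev_char = src[i-1] if i-1 >= 0 else ''
--                 next_char = src[i+5] if i+5 < n else ''
--                 if (not prev_char or not is_ident_char(prev_char)) and (not next_char or not is_ident_char(next_char)):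
--                     out_chars.append('False')
--                     i += 5
--                     continue
--
--             # 默认逐字符复制
--             out_chars.append(ch)
--             i += 1
--
--     return ''.join(out_chars)
-- ===== SOURCE B (Python) =====
-- def _convert_js_json_booleans_to_python(src: str) -> str:
--     """Tokenizer variant: consume whole string literals and whole identifier
--     words instead of tracking per-character in_string/escaped state."""
--     if not src or ('true' not in src and 'false' not in src):
--         return src
--
--     n = len(src)
--     out = []
--     i = 0
--     while i < n:
--         ch = src[i]
--         if ch == '"' or ch == "'":
--             j = i + 1
--             while j < n:
--                 c = src[j]
--                 if c == '\\':
--                     j += 2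
--                 elif c == ch:
--                     j += 1
--                     break
--                 else:
--                     j += 1
--             j = min(j, n)
--             out.append(src[i:j])
--             i = j
--         elif ch.isalnum() or ch == '_':
--             j = i + 1
--             while j < n and (src[j].isalnum() or src[j] == '_'):
--                 j += 1
--             word = src[i:j]
--             out.append('True' if word == 'true' else 'False' if word == 'false' else word)
--             i = j
--         else:
--             out.append(ch)
--             i += 1
--     return ''.join(out)
-- ===== Notes on version B (the rewrite author's own statement) =====
-- stated objective: alternative
-- what changed: Replaces A's per-character scan with in_string/escaped state flags and mid-scan startswith checks by a tokenizer that consumes whole tokens per outer step (a complete string literal, a maximal identifier word mapped via equality to true/false, or a single other character), so boolean-word boundaries follow from run maximality instead of prev/next-char tests.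
import Mathlib
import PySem

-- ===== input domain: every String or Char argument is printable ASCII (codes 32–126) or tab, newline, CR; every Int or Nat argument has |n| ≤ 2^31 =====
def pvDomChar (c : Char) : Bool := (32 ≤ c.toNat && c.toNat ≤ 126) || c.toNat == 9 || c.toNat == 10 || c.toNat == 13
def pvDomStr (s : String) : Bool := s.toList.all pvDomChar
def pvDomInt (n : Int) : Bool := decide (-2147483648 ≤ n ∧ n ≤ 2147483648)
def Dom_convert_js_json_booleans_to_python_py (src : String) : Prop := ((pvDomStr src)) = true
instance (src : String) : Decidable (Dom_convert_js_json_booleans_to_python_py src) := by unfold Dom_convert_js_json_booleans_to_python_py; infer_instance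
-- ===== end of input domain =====

-- B replaces A's per-character in_string/escaped state machine by a tokenizer that
-- consumes whole string literals and whole identifier words (objective: alternative,
-- same asymptotic cost); return values agree on every input.
-- (Loops are ported with a fuel argument — a pure totality guard, always large enough.)

-- ===== PORT A =====
-- is_ident_char(c) = c.isalnum() or c == '_'  (exact on the ASCII domain)
def pvIdent (c : Char) : Bool := c.isAlphanum || c == '_'

-- 'not prev_char or not is_ident_char(prev_char)' with prev_char = src[i-1] if i-1>=0 else ''
def pvPrevOk (l : List Char) (i : Nat) : Bool := (i == 0) || !(pvIdent (l.getD (i-1) ' '))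
-- 'not next_char or not is_ident_char(next_char)' with next_char = src[k] if k < n else ''
def pvNextOk (l : List Char) (k : Nat) : Bool := decide (l.length ≤ k) || !(pvIdent (l.getD k ' '))

-- A's while-loop: state i / in_string / string_char / escaped / out_chars.
-- fuel ≥ l.length - i is a totality guard only: every iteration advances i by ≥ 1.
def aLoop (l : List Char) : Nat → Nat → Bool → Char → Bool → List Char → List Char
  | 0, _, _, _, _, out => out
  | fuel+1, i, inString, sChar, escaped, out =>
    if i < l.length then
      let ch := l.getD i ' '
      if inString then
        if escaped then aLoop l fuel (i+1) true sChar false (out ++ [ch])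
        else if ch = '\\' then aLoop l fuel (i+1) true sChar true (out ++ [ch])
        else if ch = sChar then aLoop l fuel (i+1) false ' ' false (out ++ [ch])
        else aLoop l fuel (i+1) true sChar false (out ++ [ch])
      else if ch = '"' ∨ ch = '\'' then aLoop l fuel (i+1) true ch false (out ++ [ch])
      else if List.isPrefixOf ['t','r','u','e'] (l.drop i) && pvPrevOk l i && pvNextOk l (i+4) then
        aLoop l fuel (i+4) false sChar false (out ++ ['T','r','u','e'])
      else if List.isPrefixOf ['f','a','l','s','e'] (l.drop i) && pvPrevOk l i && pvNextOk l (i+5) then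
        aLoop l fuel (i+5) false sChar false (out ++ ['F','a','l','s','e'])
      else aLoop l fuel (i+1) false sChar false (out ++ [ch])
    else out

def convert_js_json_booleans_to_python_py (src : String) : String :=
  if src == "" || (!(PySem.Str.isIn "true" src) && !(PySem.Str.isIn "false" src)) then src
  else String.mk (aLoop src.toList src.toList.length 0 false ' ' false [])

-- ===== PORT B =====
-- inner while of the string-literal arm: index just past the closing quote (may overshoot).
-- fuel ≥ l.length - j is a totality guard only: j grows by ≥ 1 per iteration.
def strEnd (l : List Char) (q : Char) : Nat → Nat → Nat
  | 0, j => j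
  | fuel+1, j =>
    if j < l.length then
      if l.getD j ' ' = '\\' then strEnd l q fuel (j+2)
      else if l.getD j ' ' = q then j+1
      else strEnd l q fuel (j+1)
    else j

-- inner while of the identifier arm: end of the maximal identifier run
def identEnd (l : List Char) : Nat → Nat → Nat
  | 0, j => j
  | fuel+1, j =>
    if j < l.length then
      if pvIdent (l.getD j ' ') then identEnd l fuel (j+1) else j
    else j

-- B's outer while: one token per step (string literal / identifier word / other char)
def bScan (l : List Char) : Nat → Nat → List Char → List Char
  | 0, _, out => out
  | fuel+1, i, out =>
    if i < l.length then
      let ch := l.getD i ' '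
      if ch = '"' ∨ ch = '\'' then
        let j := min (strEnd l ch l.length (i+1)) l.length
        bScan l fuel j (out ++ (l.drop i).take (j - i))
      else if pvIdent ch then
        let j := identEnd l l.length (i+1)
        let w := (l.drop i).take (j - i)
        bScan l fuel j (out ++ (if w = ['t','r','u','e'] then ['T','r','u','e']
                           else if w = ['f','a','l','s','e'] then ['F','a','l','s','e'] else w))
      else bScan l fuel (i+1) (out ++ [ch])
    else out

def convert_js_json_booleans_to_python_py_alt (src : String) : String :=
  if src == "" || (!(PySem.Str.isIn "true" src) && !(PySem.Str.isIn "false" src)) then src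
  else String.mk (bScan src.toList src.toList.length 0 [])

-- ===== PRECONDITION & SPEC =====
def Spec_convert_js_json_booleans_to_python_py (src : String) (out : String) : Prop := out = convert_js_json_booleans_to_python_py_alt src
instance (src : String) (out : String) : Decidable (Spec_convert_js_json_booleans_to_python_py src out) := by unfold Spec_convert_js_json_booleans_to_python_py; infer_instance

-- ===== CLAIM (what is proved, stated in full; the proofs are below) =====
def Claim_equal_convert_js_json_booleans_to_python_py : Prop := ∀ (src : String), Dom_convert_js_json_booleans_to_python_py src → Spec_convert_js_json_booleans_to_python_py src (convert_js_json_booleans_to_python_py src)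

-- ===== LEMMAS AND PROOFS =====

-- fuel is irrelevant once it covers the remaining positions
theorem strEnd_fuel (l : List Char) (q : Char) :
    ∀ f1 f2 j, l.length - j ≤ f1 → l.length - j ≤ f2 → strEnd l q f1 j = strEnd l q f2 j := by
  intro f1
  induction f1 with
  | zero =>
      intro f2 j h1 h2
      have hj : ¬ j < l.length := by omega
      cases f2 with
      | zero => rfl
      | succ f2 => simp [strEnd, hj]
  | succ f1 ih =>
      intro f2 j h1 h2
      by_cases hj : j < l.length
      · cases f2 with
        | zero => omega
        | succ f2 =>
            simp only [strEnd, if_pos hj]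
            split_ifs
            · exact ih f2 (j+2) (by omega) (by omega)
            · rfl
            · exact ih f2 (j+1) (by omega) (by omega)
      · cases f2 with
        | zero => simp [strEnd, hj]
        | succ f2 => simp [strEnd, hj]

theorem identEnd_fuel (l : List Char) :
    ∀ f1 f2 j, l.length - j ≤ f1 → l.length - j ≤ f2 → identEnd l f1 j = identEnd l f2 j := by
  intro f1
  induction f1 with
  | zero =>
      intro f2 j h1 h2
      have hj : ¬ j < l.length := by omega
      cases f2 with
      | zero => rfl
      | succ f2 => simp [identEnd, hj]
  | succ f1 ih =>
      intro f2 j h1 h2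
      by_cases hj : j < l.length
      · cases f2 with
        | zero => omega
        | succ f2 =>
            simp only [identEnd, if_pos hj]
            split_ifs
            · exact ih f2 (j+1) (by omega) (by omega)
            · rfl
      · cases f2 with
        | zero => simp [identEnd, hj]
        | succ f2 => simp [identEnd, hj]

theorem strEnd_ge_fuel (l : List Char) (q : Char) : ∀ f j, j ≤ strEnd l q f j := by
  intro f
  induction f with
  | zero => intro j; simp [strEnd]
  | succ f ih =>
      intro j
      by_cases hj : j < l.length
      · simp only [strEnd, if_pos hj]
        split_ifs
        · exact le_trans (by omega) (ih (j+2))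
        · omega
        · exact le_trans (by omega) (ih (j+1))
      · simp [strEnd, hj]

theorem identEnd_ge_fuel (l : List Char) : ∀ f j, j ≤ identEnd l f j := by
  intro f
  induction f with
  | zero => intro j; simp [identEnd]
  | succ f ih =>
      intro j
      by_cases hj : j < l.length
      · simp only [identEnd, if_pos hj]
        split_ifs
        · exact le_trans (by omega) (ih (j+1))
        · omega
      · simp [identEnd, hj]

theorem aLoop_fuel (l : List Char) :
    ∀ f1 f2 i inS sc esc out, l.length - i ≤ f1 → l.length - i ≤ f2 →
      aLoop l f1 i inS sc esc out = aLoop l f2 i inS sc esc out := by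
  intro f1
  induction f1 with
  | zero =>
      intro f2 i inS sc esc out h1 h2
      have hi : ¬ i < l.length := by omega
      cases f2 with
      | zero => rfl
      | succ f2 => simp [aLoop, hi]
  | succ f1 ih =>
      intro f2 i inS sc esc out h1 h2
      by_cases hi : i < l.length
      · cases f2 with
        | zero => omega
        | succ f2 =>
            simp only [aLoop, if_pos hi]
            split_ifs <;> apply ih <;> omega
      · cases f2 with
        | zero => simp [aLoop, hi]
        | succ f2 => simp [aLoop, hi]

theorem bScan_fuel (l : List Char) :
    ∀ f1 f2 i out, l.length - i ≤ f1 → l.length - i ≤ f2 →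
      bScan l f1 i out = bScan l f2 i out := by
  intro f1
  induction f1 with
  | zero =>
      intro f2 i out h1 h2
      have hi : ¬ i < l.length := by omega
      cases f2 with
      | zero => rfl
      | succ f2 => simp [bScan, hi]
  | succ f1 ih =>
      intro f2 i out h1 h2
      by_cases hi : i < l.length
      · cases f2 with
        | zero => omega
        | succ f2 =>
            simp only [bScan, if_pos hi]
            have hs := strEnd_ge_fuel l (l.getD i ' ') l.length (i+1)
            have hie := identEnd_ge_fuel l l.length (i+1)
            split_ifs <;> apply ih <;> omega
      · cases f2 with
        | zero => simp [bScan, hi]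
        | succ f2 => simp [bScan, hi]

-- canonical-fuel views of the four loops (proof-side only)
def aLoopC (l : List Char) (i : Nat) (inS : Bool) (sc : Char) (esc : Bool) (out : List Char) : List Char :=
  aLoop l (l.length - i) i inS sc esc out
def strEndC (l : List Char) (q : Char) (j : Nat) : Nat := strEnd l q (l.length - j) j
def identEndC (l : List Char) (j : Nat) : Nat := identEnd l (l.length - j) j
def bScanC (l : List Char) (i : Nat) (out : List Char) : List Char := bScan l (l.length - i) i out

theorem aLoopC_eq (l : List Char) (i : Nat) (inS : Bool) (sc : Char) (esc : Bool) (out : List Char) :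
    aLoopC l i inS sc esc out =
      if i < l.length then
        (let ch := l.getD i ' '
        if inS then
          if esc then aLoopC l (i+1) true sc false (out ++ [ch])
          else if ch = '\\' then aLoopC l (i+1) true sc true (out ++ [ch])
          else if ch = sc then aLoopC l (i+1) false ' ' false (out ++ [ch])
          else aLoopC l (i+1) true sc false (out ++ [ch])
        else if ch = '"' ∨ ch = '\'' then aLoopC l (i+1) true ch false (out ++ [ch])
        else if List.isPrefixOf ['t','r','u','e'] (l.drop i) && pvPrevOk l i && pvNextOk l (i+4) then
          aLoopC l (i+4) false sc false (out ++ ['T','r','u','e'])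
        else if List.isPrefixOf ['f','a','l','s','e'] (l.drop i) && pvPrevOk l i && pvNextOk l (i+5) then
          aLoopC l (i+5) false sc false (out ++ ['F','a','l','s','e'])
        else aLoopC l (i+1) false sc false (out ++ [ch]))
      else out := by
  unfold aLoopC
  by_cases hi : i < l.length
  · rcases hne : l.length - i with _ | f
    · omega
    · simp only [hne, aLoop, if_pos hi]
      split_ifs <;> apply aLoop_fuel <;> omega
  · rcases hne : l.length - i with _ | f
    · simp [aLoop, hi]
    · omega

theorem strEndC_eq (l : List Char) (q : Char) (j : Nat) :
    strEndC l q j =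
      if j < l.length then
        (if l.getD j ' ' = '\\' then strEndC l q (j+2)
        else if l.getD j ' ' = q then j+1
        else strEndC l q (j+1))
      else j := by
  unfold strEndC
  by_cases hj : j < l.length
  · rcases hne : l.length - j with _ | f
    · omega
    · simp only [hne, strEnd, if_pos hj]
      split_ifs
      · exact strEnd_fuel l q f (l.length - (j+2)) (j+2) (by omega) (by omega)
      · rfl
      · exact strEnd_fuel l q f (l.length - (j+1)) (j+1) (by omega) (by omega)
  · rcases hne : l.length - j with _ | f
    · simp [strEnd, hj]
    · omega

theorem bScanC_eq (l : List Char) (i : Nat) (out : List Char) :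
    bScanC l i out =
      if i < l.length then
        (let ch := l.getD i ' '
        if ch = '"' ∨ ch = '\'' then
          let j := min (strEndC l ch (i+1)) l.length
          bScanC l j (out ++ (l.drop i).take (j - i))
        else if pvIdent ch then
          let j := identEndC l (i+1)
          let w := (l.drop i).take (j - i)
          bScanC l j (out ++ (if w = ['t','r','u','e'] then ['T','r','u','e']
                             else if w = ['f','a','l','s','e'] then ['F','a','l','s','e'] else w))
        else bScanC l (i+1) (out ++ [ch]))
      else out := by
  unfold bScanC strEndC identEndC
  by_cases hi : i < l.length
  · rcases hne : l.length - i with _ | f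
    · omega
    · simp only [hne, bScan, if_pos hi]
      rw [strEnd_fuel l (l.getD i ' ') l.length (l.length - (i+1)) (i+1) (by omega) (by omega),
          identEnd_fuel l l.length (l.length - (i+1)) (i+1) (by omega) (by omega)]
      have hs := strEnd_ge_fuel l (l.getD i ' ') (l.length - (i+1)) (i+1)
      have hie := identEnd_ge_fuel l (l.length - (i+1)) (i+1)
      split_ifs <;> apply bScan_fuel <;> omega
  · rcases hne : l.length - i with _ | f
    · simp [bScan, hi]
    · omega

-- base / stop lemmas for the canonical views
theorem aLoop_stop (l : List Char) (i : Nat) (b : Bool) (sc : Char) (e : Bool) (out : List Char)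
    (h : l.length ≤ i) : aLoopC l i b sc e out = out := by
  rw [aLoopC_eq]; simp [Nat.not_lt.2 h]

theorem strEnd_stop (l : List Char) (q : Char) (j : Nat) (h : l.length ≤ j) : strEndC l q j = j := by
  rw [strEndC_eq]; simp [Nat.not_lt.2 h]

theorem bScan_stop (l : List Char) (i : Nat) (out : List Char) (h : l.length ≤ i) :
    bScanC l i out = out := by
  rw [bScanC_eq]; simp [Nat.not_lt.2 h]

theorem strEnd_ge (l : List Char) (q : Char) (j : Nat) : j ≤ strEndC l q j :=
  strEnd_ge_fuel l q (l.length - j) j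

theorem identEnd_ge (l : List Char) (j : Nat) : j ≤ identEndC l j :=
  identEnd_ge_fuel l (l.length - j) j

-- strEndC: a result inside the string ends just after the closing quote
theorem strEnd_close_raw (l : List Char) (q : Char) :
    ∀ f j, l.length - j ≤ f → strEnd l q f j < l.length → l.getD (strEnd l q f j - 1) ' ' = q := by
  intro f
  induction f with
  | zero =>
      intro j hb hlt
      simp only [strEnd] at hlt
      omega
  | succ f ih =>
      intro j hb hlt
      by_cases hj : j < l.length
      · simp only [strEnd, if_pos hj] at hlt ⊢
        split_ifs at hlt ⊢ with h1 h2
        · exact ih (j+2) (by omega) hlt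
        · simpa using h2
        · exact ih (j+1) (by omega) hlt
      · simp only [strEnd, if_neg hj] at hlt
        omega

theorem strEnd_close (l : List Char) (q : Char) (j : Nat) (h : strEndC l q j < l.length) :
    l.getD (strEndC l q j - 1) ' ' = q :=
  strEnd_close_raw l q (l.length - j) j (le_refl _) h

-- identEndC basic facts
theorem identEnd_le_raw (l : List Char) : ∀ f j, j ≤ l.length → identEnd l f j ≤ l.length := by
  intro f
  induction f with
  | zero => intro j h; simpa [identEnd] using h
  | succ f ih =>
      intro j h
      by_cases hj : j < l.length
      · simp only [identEnd, if_pos hj]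
        split_ifs
        · exact ih (j+1) (by omega)
        · exact h
      · simpa [identEnd, hj] using h

theorem identEnd_le (l : List Char) (j : Nat) (h : j ≤ l.length) : identEndC l j ≤ l.length :=
  identEnd_le_raw l (l.length - j) j h

theorem identEnd_mem_raw (l : List Char) :
    ∀ f j t, j ≤ t → t < identEnd l f j → pvIdent (l.getD t ' ') = true := by
  intro f
  induction f with
  | zero => intro j t h1 h2; simp only [identEnd] at h2; omega
  | succ f ih =>
      intro j t h1 h2
      by_cases hj : j < l.length
      · simp only [identEnd, if_pos hj] at h2
        split_ifs at h2 with hident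
        · rcases Nat.eq_or_lt_of_le h1 with rfl | h'
          · exact hident
          · exact ih (j+1) t h' h2
        · omega
      · simp only [identEnd, if_neg hj] at h2
        omega

theorem identEnd_mem (l : List Char) (j : Nat) :
    ∀ t, j ≤ t → t < identEndC l j → pvIdent (l.getD t ' ') = true :=
  fun t h1 h2 => identEnd_mem_raw l (l.length - j) j t h1 h2

theorem identEnd_max_raw (l : List Char) :
    ∀ f j, l.length - j ≤ f →
      (l.length ≤ identEnd l f j ∨ pvIdent (l.getD (identEnd l f j) ' ') = false) := by
  intro f
  induction f with
  | zero => intro j h; left; simp only [identEnd]; omega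
  | succ f ih =>
      intro j h
      by_cases hj : j < l.length
      · simp only [identEnd, if_pos hj]
        split_ifs with hident
        · exact ih (j+1) (by omega)
        · right; simpa using hident
      · left; simp only [identEnd, if_neg hj]; omega

theorem identEnd_max (l : List Char) (j : Nat) :
    l.length ≤ identEndC l j ∨ pvIdent (l.getD (identEndC l j) ' ') = false :=
  identEnd_max_raw l (l.length - j) j (le_refl _)

theorem identEnd_unique_raw (l : List Char) :
    ∀ f j, l.length - j ≤ f → ∀ e, j ≤ e → e ≤ l.length →
      (∀ t, j ≤ t → t < e → pvIdent (l.getD t ' ') = true) →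
      (l.length ≤ e ∨ pvIdent (l.getD e ' ') = false) →
      identEnd l f j = e := by
  intro f
  induction f with
  | zero =>
      intro j h e he1 he2 hrun hmax
      simp only [identEnd]
      omega
  | succ f ih =>
      intro j h e he1 he2 hrun hmax
      by_cases hj : j < l.length
      · simp only [identEnd, if_pos hj]
        split_ifs with hident
        · have hne : j ≠ e := by
            rintro rfl
            rcases hmax with hx | hx
            · omega
            · rw [hident] at hx; cases hx
          exact ih (j+1) (by omega) e (by omega) he2 (fun t ht1 ht2 => hrun t (by omega) ht2) hmax
        · by_contra hne
          exact absurd (hrun j (le_refl j) (by omega)) (by simpa using hident)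
      · simp only [identEnd, if_neg hj]
        omega

theorem identEnd_unique (l : List Char) (j : Nat) :
    ∀ e, j ≤ e → e ≤ l.length →
      (∀ t, j ≤ t → t < e → pvIdent (l.getD t ' ') = true) →
      (l.length ≤ e ∨ pvIdent (l.getD e ' ') = false) →
      identEndC l j = e :=
  fun e a b c d => identEnd_unique_raw l (l.length - j) j (le_refl _) e a b c d


theorem pvIdent_ne_dq (c : Char) (h : pvIdent c = true) : ¬ (c = '"' ∨ c = '\'') := by
  rintro (rfl | rfl) <;> exact absurd h (by decide)

theorem getD_drop' (l : List Char) (n m : Nat) (d : Char) : (l.drop n).getD m d = l.getD (n+m) d := by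
  simp [List.getD_eq_getElem?_getD, List.getElem?_drop]

theorem slice_cons (l : List Char) (i j : Nat) (h : i < l.length) (hj : i < j) :
    (l.drop i).take (j - i) = l[i] :: (l.drop (i+1)).take (j - (i+1)) := by
  rw [List.drop_eq_getElem_cons h, show j - i = (j - (i+1)) + 1 by omega, List.take_succ_cons]

theorem slice_one (l : List Char) (i : Nat) (h : i < l.length) :
    (l.drop i).take 1 = [l[i]] := by
  have := slice_cons l i (i+1) h (by omega)
  simpa using this

theorem pvNextOk_iff (l : List Char) (k : Nat) :
    pvNextOk l k = true ↔ (l.length ≤ k ∨ pvIdent (l.getD k ' ') = false) := by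
  simp [pvNextOk]

-- a prefix of the drop pins characters of l
theorem prefix_getD (l : List Char) (i : Nat) (pfx : List Char)
    (h : pfx <+: l.drop i) : ∀ k, k < pfx.length → l.getD (i+k) ' ' = pfx.getD k ' ' := by
  intro k hk
  rcases h with ⟨t, ht⟩
  rw [← getD_drop', ← ht]
  rw [List.getD_eq_getElem?_getD, List.getD_eq_getElem?_getD, List.getElem?_append_left hk]

theorem prefix_length_le (l : List Char) (i : Nat) (pfx : List Char) (hlt : i < l.length)
    (h : pfx <+: l.drop i) : i + pfx.length ≤ l.length := by
  have := h.length_le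
  simp [List.length_drop] at this
  omega

-- A consumes a string body exactly to strEndC, copying it verbatim
theorem stringSeg (l : List Char) : ∀ m i, l.length - i ≤ m → ∀ (q : Char) (out : List Char),
    aLoopC l i true q false out =
      aLoopC l (min (strEndC l q i) l.length) false ' ' false
        (out ++ (l.drop i).take (min (strEndC l q i) l.length - i)) := by
  intro m
  induction m with
  | zero =>
      intro i hi q out
      have hge : l.length ≤ i := by omega
      rw [aLoop_stop l i true q false out hge, strEnd_stop l q i hge]
      have h1 : min i l.length = l.length := by omega
      have h2 : l.length - i = 0 := by omega
      rw [h1, h2]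
      simp [aLoop_stop l l.length false ' ' false out (le_refl _)]
  | succ m ih =>
      intro i hi q out
      by_cases hlt : i < l.length
      · by_cases hb : l[i] = '\\'
        · have hstep : aLoopC l i true q false out = aLoopC l (i+1) true q true (out ++ [l[i]]) := by
            rw [aLoopC_eq]; simp [hlt, hb]
          have hse : strEndC l q i = strEndC l q (i+2) := by
            rw [strEndC_eq]; simp [hlt, hb]
          by_cases hlt2 : i + 1 < l.length
          · have hstep2 : aLoopC l (i+1) true q true (out ++ [l[i]]) =
                aLoopC l (i+2) true q false (out ++ [l[i]] ++ [l[i+1]]) := by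
              rw [aLoopC_eq]; simp [hlt2]
            have hih := ih (i+2) (by omega) q (out ++ [l[i]] ++ [l[i+1]])
            rw [hstep, hstep2, hih, hse]
            have hJ : i + 2 ≤ min (strEndC l q (i+2)) l.length := by
              have := strEnd_ge l q (i+2); omega
            congr 1
            rw [slice_cons l i _ hlt (by omega), slice_cons l (i+1) _ hlt2 (by omega)]
            simp
          · have hstop : aLoopC l (i+1) true q true (out ++ [l[i]]) = out ++ [l[i]] :=
              aLoop_stop l (i+1) true q true (out ++ [l[i]]) (by omega)
            rw [hstep, hstop, hse, strEnd_stop l q (i+2) (by omega)]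
            have h1 : min (i+2) l.length = l.length := by omega
            rw [h1, aLoop_stop l l.length false ' ' false (out ++ (l.drop i).take (l.length - i)) (le_refl _)]
            have h2 : l.length - i = 1 := by omega
            rw [h2, slice_one l i hlt]
        · by_cases hq : l[i] = q
          · have hbq : ¬ q = '\\' := by rw [← hq]; exact hb
            have hstep : aLoopC l i true q false out = aLoopC l (i+1) false ' ' false (out ++ [l[i]]) := by
              rw [aLoopC_eq]; simp [hlt, hq, hbq]
            have hse : strEndC l q i = i + 1 := by
              rw [strEndC_eq]; simp [hlt, hq, hbq]
            rw [hstep, hse]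
            have h1 : min (i+1) l.length = i+1 := by omega
            have h2 : i + 1 - i = 1 := by omega
            rw [h1, h2, slice_one l i hlt]
          · have hstep : aLoopC l i true q false out = aLoopC l (i+1) true q false (out ++ [l[i]]) := by
              rw [aLoopC_eq]; simp [hlt, hb, hq]
            have hse : strEndC l q i = strEndC l q (i+1) := by
              rw [strEndC_eq]; simp [hlt, hb, hq]
            have hih := ih (i+1) (by omega) q (out ++ [l[i]])
            rw [hstep, hih, hse]
            have hJ : i + 1 ≤ min (strEndC l q (i+1)) l.length := by
              have := strEnd_ge l q (i+1); omega
            congr 1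
            rw [slice_cons l i _ hlt (by omega)]
            simp
      · have hge : l.length ≤ i := by omega
        rw [aLoop_stop l i true q false out hge, strEnd_stop l q i hge]
        have h1 : min i l.length = l.length := by omega
        have h2 : l.length - i = 0 := by omega
        rw [h1, h2]
        simp [aLoop_stop l l.length false ' ' false out (le_refl _)]

-- A copies the tail of an identifier run verbatim (blocked by the ident char to its left)
theorem runCopy (l : List Char) : ∀ m k, l.length - k ≤ m → ∀ (e : Nat) (sc : Char) (out : List Char),
    0 < k → pvIdent (l.getD (k-1) ' ') = true → k ≤ e → e ≤ l.length →
    (∀ t, k ≤ t → t < e → pvIdent (l.getD t ' ') = true) →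
    aLoopC l k false sc false out = aLoopC l e false sc false (out ++ (l.drop k).take (e - k)) := by
  intro m
  induction m with
  | zero =>
      intro k hk e sc out hk0 hprev hke hel hrun
      have : k = e := by omega
      subst this
      simp
  | succ m ih =>
      intro k hk e sc out hk0 hprev hke hel hrun
      rcases Nat.eq_or_lt_of_le hke with rfl | hlt
      · simp
      · have hklen : k < l.length := by omega
        have hid : pvIdent (l.getD k ' ') = true := hrun k (le_refl k) hlt
        have hid' : pvIdent (l[k]) = true := by rwa [List.getD_eq_getElem l ' ' hklen] at hid
        have hnq : ¬(l[k] = '"' ∨ l[k] = '\'') := pvIdent_ne_dq _ hid'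
        have hprev' : pvIdent (l[k-1]?.getD ' ') = true := hprev
        have hpo : pvPrevOk l k = false := by
          simp [pvPrevOk, hprev']
          omega
        have hstep : aLoopC l k false sc false out = aLoopC l (k+1) false sc false (out ++ [l[k]]) := by
          rw [aLoopC_eq]; simp [hklen, hnq, hpo]
        have hprev2 : pvIdent (l.getD (k+1-1) ' ') = true := by
          simpa using hid
        have hih := ih (k+1) (by omega) e sc (out ++ [l[k]]) (by omega) hprev2 hlt hel
          (fun t ht1 ht2 => hrun t (by omega) ht2)
        rw [hstep, hih]
        congr 1
        rw [slice_cons l k e hklen hlt]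
        simp

-- step lemmas for aLoopC in the non-string state
theorem aLoop_step_quote (l : List Char) (i : Nat) (sc : Char) (out : List Char)
    (h : i < l.length) (hq : l[i] = '"' ∨ l[i] = '\'') :
    aLoopC l i false sc false out = aLoopC l (i+1) true (l[i]) false (out ++ [l[i]]) := by
  rw [aLoopC_eq]; simp [h, hq]

theorem aLoop_step_word_t (l : List Char) (i : Nat) (sc : Char) (out : List Char)
    (h : i < l.length) (hq : ¬(l[i] = '"' ∨ l[i] = '\''))
    (hc : (List.isPrefixOf ['t','r','u','e'] (l.drop i) && pvPrevOk l i && pvNextOk l (i+4)) = true) :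
    aLoopC l i false sc false out = aLoopC l (i+4) false sc false (out ++ ['T','r','u','e']) := by
  rw [aLoopC_eq]; simp [h, hq, hc]

theorem aLoop_step_word_f (l : List Char) (i : Nat) (sc : Char) (out : List Char)
    (h : i < l.length) (hq : ¬(l[i] = '"' ∨ l[i] = '\''))
    (ht : (List.isPrefixOf ['t','r','u','e'] (l.drop i) && pvPrevOk l i && pvNextOk l (i+4)) = false)
    (hc : (List.isPrefixOf ['f','a','l','s','e'] (l.drop i) && pvPrevOk l i && pvNextOk l (i+5)) = true) :
    aLoopC l i false sc false out = aLoopC l (i+5) false sc false (out ++ ['F','a','l','s','e']) := by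
  rw [aLoopC_eq]; simp [h, hq, ht, hc]

theorem aLoop_step_copy (l : List Char) (i : Nat) (sc : Char) (out : List Char)
    (h : i < l.length) (hq : ¬(l[i] = '"' ∨ l[i] = '\''))
    (ht : (List.isPrefixOf ['t','r','u','e'] (l.drop i) && pvPrevOk l i && pvNextOk l (i+4)) = false)
    (hf : (List.isPrefixOf ['f','a','l','s','e'] (l.drop i) && pvPrevOk l i && pvNextOk l (i+5)) = false) :
    aLoopC l i false sc false out = aLoopC l (i+1) false sc false (out ++ [l[i]]) := by
  rw [aLoopC_eq]; simp [h, hq, ht, hf]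

-- step lemmas for bScanC
theorem bScan_step_str (l : List Char) (i : Nat) (out : List Char)
    (h : i < l.length) (hq : l[i] = '"' ∨ l[i] = '\'') :
    bScanC l i out = bScanC l (min (strEndC l (l[i]) (i+1)) l.length)
      (out ++ (l.drop i).take (min (strEndC l (l[i]) (i+1)) l.length - i)) := by
  rw [bScanC_eq]; simp [h, hq]

theorem bScan_step_ident (l : List Char) (i : Nat) (out : List Char)
    (h : i < l.length) (hq : ¬(l[i] = '"' ∨ l[i] = '\'')) (hid : pvIdent (l[i]) = true) :
    bScanC l i out = bScanC l (identEndC l (i+1))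
      (out ++ (if (l.drop i).take (identEndC l (i+1) - i) = ['t','r','u','e'] then ['T','r','u','e']
               else if (l.drop i).take (identEndC l (i+1) - i) = ['f','a','l','s','e'] then ['F','a','l','s','e']
               else (l.drop i).take (identEndC l (i+1) - i))) := by
  rw [bScanC_eq]; simp [h, hq, hid]

theorem bScan_step_other (l : List Char) (i : Nat) (out : List Char)
    (h : i < l.length) (hq : ¬(l[i] = '"' ∨ l[i] = '\'')) (hid : pvIdent (l[i]) = false) :
    bScanC l i out = bScanC l (i+1) (out ++ [l[i]]) := by
  rw [bScanC_eq]; simp [h, hq, hid]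

-- if A's 'true' condition fires, the identifier run at i is exactly the word 'true'
theorem true_cond_word (l : List Char) (i : Nat) (hlt : i < l.length)
    (hc : (List.isPrefixOf ['t','r','u','e'] (l.drop i) && pvPrevOk l i && pvNextOk l (i+4)) = true) :
    identEndC l (i+1) = i + 4 ∧ (l.drop i).take 4 = ['t','r','u','e'] := by
  simp only [Bool.and_eq_true] at hc
  obtain ⟨⟨hp, _⟩, hn⟩ := hc
  rw [List.isPrefixOf_iff_prefix] at hp
  have hlen : i + 4 ≤ l.length := by simpa using prefix_length_le l i _ hlt hp
  have hch := prefix_getD l i _ hp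
  have h1 : l.getD (i+1) ' ' = 'r' := by simpa using hch 1 (by norm_num)
  have h2 : l.getD (i+2) ' ' = 'u' := by simpa using hch 2 (by norm_num)
  have h3 : l.getD (i+3) ' ' = 'e' := by simpa using hch 3 (by norm_num)
  have hrun : ∀ t, i+1 ≤ t → t < i+4 → pvIdent (l.getD t ' ') = true := by
    intro t ht1 ht2
    have hcase : t = i+1 ∨ t = i+2 ∨ t = i+3 := by omega
    rcases hcase with h | h | h <;> subst h
    · rw [h1]; decide
    · rw [h2]; decide
    · rw [h3]; decide
  have hmax := (pvNextOk_iff l (i+4)).1 hn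
  refine ⟨identEnd_unique l (i+1) (i+4) (by omega) hlen hrun hmax, ?_⟩
  obtain ⟨t, ht⟩ := hp
  rw [← ht]
  simpa using List.take_left (l₁ := ['t','r','u','e']) (l₂ := t)

theorem false_cond_word (l : List Char) (i : Nat) (hlt : i < l.length)
    (hc : (List.isPrefixOf ['f','a','l','s','e'] (l.drop i) && pvPrevOk l i && pvNextOk l (i+5)) = true) :
    identEndC l (i+1) = i + 5 ∧ (l.drop i).take 5 = ['f','a','l','s','e'] := by
  simp only [Bool.and_eq_true] at hc
  obtain ⟨⟨hp, _⟩, hn⟩ := hc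
  rw [List.isPrefixOf_iff_prefix] at hp
  have hlen : i + 5 ≤ l.length := by simpa using prefix_length_le l i _ hlt hp
  have hch := prefix_getD l i _ hp
  have h1 : l.getD (i+1) ' ' = 'a' := by simpa using hch 1 (by norm_num)
  have h2 : l.getD (i+2) ' ' = 'l' := by simpa using hch 2 (by norm_num)
  have h3 : l.getD (i+3) ' ' = 's' := by simpa using hch 3 (by norm_num)
  have h4 : l.getD (i+4) ' ' = 'e' := by simpa using hch 4 (by norm_num)
  have hrun : ∀ t, i+1 ≤ t → t < i+5 → pvIdent (l.getD t ' ') = true := by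
    intro t ht1 ht2
    have hcase : t = i+1 ∨ t = i+2 ∨ t = i+3 ∨ t = i+4 := by omega
    rcases hcase with h | h | h | h <;> subst h
    · rw [h1]; decide
    · rw [h2]; decide
    · rw [h3]; decide
    · rw [h4]; decide
  have hmax := (pvNextOk_iff l (i+5)).1 hn
  refine ⟨identEnd_unique l (i+1) (i+5) (by omega) hlen hrun hmax, ?_⟩
  obtain ⟨t, ht⟩ := hp
  rw [← ht]
  simpa using List.take_left (l₁ := ['f','a','l','s','e']) (l₂ := t)

theorem main_lemma (l : List Char) : ∀ m i, l.length - i ≤ m → ∀ (sc : Char) (out : List Char),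
    (i < l.length → pvIdent (l.getD i ' ') = true → (i = 0 ∨ pvIdent (l.getD (i-1) ' ') = false)) →
    aLoopC l i false sc false out = bScanC l i out := by
  intro m
  induction m with
  | zero =>
      intro i hi sc out _
      have hge : l.length ≤ i := by omega
      rw [aLoop_stop l i false sc false out hge, bScan_stop l i out hge]
  | succ m ih =>
      intro i hi sc out hside
      by_cases hlt : i < l.length
      · have hgd : l.getD i ' ' = l[i] := List.getD_eq_getElem l ' ' hlt
        by_cases hquote : l[i] = '"' ∨ l[i] = '\''
        · -- string-literal token
          have hj1 : i + 1 ≤ min (strEndC l (l[i]) (i+1)) l.length := by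
            have := strEnd_ge l (l[i]) (i+1); omega
          have hside' : min (strEndC l (l[i]) (i+1)) l.length < l.length →
              pvIdent (l.getD (min (strEndC l (l[i]) (i+1)) l.length) ' ') = true →
              (min (strEndC l (l[i]) (i+1)) l.length = 0 ∨
               pvIdent (l.getD (min (strEndC l (l[i]) (i+1)) l.length - 1) ' ') = false) := by
            intro hjlt _
            right
            have hs : strEndC l (l[i]) (i+1) < l.length := by omega
            have hmin : min (strEndC l (l[i]) (i+1)) l.length = strEndC l (l[i]) (i+1) := by omega
            rw [hmin, strEnd_close l (l[i]) (i+1) hs]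
            rcases hquote with h | h <;> rw [h] <;> decide
          have hih := ih (min (strEndC l (l[i]) (i+1)) l.length) (by omega) ' '
            (out ++ [l[i]] ++ (l.drop (i+1)).take (min (strEndC l (l[i]) (i+1)) l.length - (i+1))) hside'
          rw [aLoop_step_quote l i sc out hlt hquote,
              stringSeg l (l.length - (i+1)) (i+1) (le_refl _) (l[i]) (out ++ [l[i]]),
              hih, bScan_step_str l i out hlt hquote]
          congr 1
          rw [slice_cons l i _ hlt (by omega)]
          simp
        · by_cases hident : pvIdent (l[i]) = true
          · -- identifier token
            have hj1 : i + 1 ≤ identEndC l (i+1) := identEnd_ge l (i+1)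
            have hjle : identEndC l (i+1) ≤ l.length := identEnd_le l (i+1) (by omega)
            have hmax := identEnd_max l (i+1)
            have hwlen : ((l.drop i).take (identEndC l (i+1) - i)).length = identEndC l (i+1) - i := by
              simp [List.length_take, List.length_drop]; omega
            have hprevok : pvPrevOk l i = true := by
              rcases hside hlt (by rw [hgd]; exact hident) with h | h
              · simp [pvPrevOk, h]
              · have h' : pvIdent (l[i-1]?.getD ' ') = false := h
                simp [pvPrevOk, h']
            have hnextok : pvNextOk l (identEndC l (i+1)) = true := (pvNextOk_iff l _).2 hmax
            have hside' : identEndC l (i+1) < l.length →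
                pvIdent (l.getD (identEndC l (i+1)) ' ') = true →
                (identEndC l (i+1) = 0 ∨ pvIdent (l.getD (identEndC l (i+1) - 1) ' ') = false) := by
              intro hjlt hid
              rcases hmax with h | h
              · omega
              · rw [h] at hid; simp at hid
            by_cases hwt : (l.drop i).take (identEndC l (i+1) - i) = ['t','r','u','e']
            · have hj4 : identEndC l (i+1) = i + 4 := by
                have := congrArg List.length hwt
                rw [hwlen] at this; simp at this; omega
              have hpre : List.isPrefixOf ['t','r','u','e'] (l.drop i) = true := by
                rw [List.isPrefixOf_iff_prefix, ← hwt]; exact List.take_prefix _ _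
              have hcond : (List.isPrefixOf ['t','r','u','e'] (l.drop i) && pvPrevOk l i && pvNextOk l (i+4)) = true := by
                rw [hpre, hprevok, ← hj4, hnextok]; rfl
              rw [aLoop_step_word_t l i sc out hlt hquote hcond,
                  bScan_step_ident l i out hlt hquote hident, hwt]
              simp only [if_pos rfl]
              rw [← hj4]
              exact ih _ (by omega) sc _ hside'
            · by_cases hwf : (l.drop i).take (identEndC l (i+1) - i) = ['f','a','l','s','e']
              · have hj5 : identEndC l (i+1) = i + 5 := by
                  have := congrArg List.length hwf
                  rw [hwlen] at this; simp at this; omega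
                have hfirst : l[i] = 'f' := by
                  have h5 := slice_cons l i (identEndC l (i+1)) hlt (by omega)
                  rw [hwf] at h5
                  injection h5 with h1 _
                  exact h1.symm
                have htf : (List.isPrefixOf ['t','r','u','e'] (l.drop i) && pvPrevOk l i && pvNextOk l (i+4)) = false := by
                  by_contra hne
                  have hc : (List.isPrefixOf ['t','r','u','e'] (l.drop i) && pvPrevOk l i && pvNextOk l (i+4)) = true := by
                    simpa [and_assoc] using hne
                  have hw4 := (true_cond_word l i hlt hc).2
                  have h5 := slice_cons l i (i+4) hlt (by omega)
                  rw [show i + 4 - i = 4 by omega, hw4] at h5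
                  injection h5 with h1 _
                  rw [hfirst] at h1
                  exact absurd h1 (by decide)
                have hpre : List.isPrefixOf ['f','a','l','s','e'] (l.drop i) = true := by
                  rw [List.isPrefixOf_iff_prefix, ← hwf]; exact List.take_prefix _ _
                have hcond : (List.isPrefixOf ['f','a','l','s','e'] (l.drop i) && pvPrevOk l i && pvNextOk l (i+5)) = true := by
                  rw [hpre, hprevok, ← hj5, hnextok]; rfl
                rw [aLoop_step_word_f l i sc out hlt hquote htf hcond,
                    bScan_step_ident l i out hlt hquote hident, hwf]
                simp only [if_neg (by rw [hwf] at hwt; exact hwt), if_pos rfl]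
                rw [← hj5]
                exact ih _ (by omega) sc _ hside'
              · -- ordinary identifier word: A copies it character by character
                have htf : (List.isPrefixOf ['t','r','u','e'] (l.drop i) && pvPrevOk l i && pvNextOk l (i+4)) = false := by
                  by_contra hne
                  have hc : (List.isPrefixOf ['t','r','u','e'] (l.drop i) && pvPrevOk l i && pvNextOk l (i+4)) = true := by
                    simpa [and_assoc] using hne
                  obtain ⟨hj4, hw4⟩ := true_cond_word l i hlt hc
                  rw [hj4, show i + 4 - i = 4 by omega] at hwt
                  exact hwt hw4
                have hff : (List.isPrefixOf ['f','a','l','s','e'] (l.drop i) && pvPrevOk l i && pvNextOk l (i+5)) = false := by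
                  by_contra hne
                  have hc : (List.isPrefixOf ['f','a','l','s','e'] (l.drop i) && pvPrevOk l i && pvNextOk l (i+5)) = true := by
                    simpa [and_assoc] using hne
                  obtain ⟨hj5, hw5⟩ := false_cond_word l i hlt hc
                  rw [hj5, show i + 5 - i = 5 by omega] at hwf
                  exact hwf hw5
                have hprev2 : pvIdent (l.getD (i+1-1) ' ') = true := by
                  simp only [Nat.add_sub_cancel]
                  rw [List.getD_eq_getElem l ' ' hlt]
                  exact hident
                have hrc := runCopy l (l.length - (i+1)) (i+1) (le_refl _) (identEndC l (i+1)) sc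
                  (out ++ [l[i]]) (by omega) hprev2 hj1 hjle (identEnd_mem l (i+1))
                have hih := ih (identEndC l (i+1)) (by omega) sc
                  (out ++ [l[i]] ++ (l.drop (i+1)).take (identEndC l (i+1) - (i+1))) hside'
                rw [aLoop_step_copy l i sc out hlt hquote htf hff, hrc, hih,
                    bScan_step_ident l i out hlt hquote hident]
                rw [if_neg hwt, if_neg hwf]
                congr 1
                rw [slice_cons l i _ hlt (by omega)]
                simp
          · -- non-identifier, non-quote character
            have hid' : pvIdent (l[i]) = false := by simpa using hident
            have htf : (List.isPrefixOf ['t','r','u','e'] (l.drop i) && pvPrevOk l i && pvNextOk l (i+4)) = false := by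
              by_contra hne
              have hc : (List.isPrefixOf ['t','r','u','e'] (l.drop i) && pvPrevOk l i && pvNextOk l (i+4)) = true := by
                simpa [and_assoc] using hne
              have hw4 := (true_cond_word l i hlt hc).2
              have h5 := slice_cons l i (i+4) hlt (by omega)
              rw [show i + 4 - i = 4 by omega, hw4] at h5
              injection h5 with h1 _
              rw [← h1] at hid'
              exact absurd hid' (by decide)
            have hff : (List.isPrefixOf ['f','a','l','s','e'] (l.drop i) && pvPrevOk l i && pvNextOk l (i+5)) = false := by
              by_contra hne
              have hc : (List.isPrefixOf ['f','a','l','s','e'] (l.drop i) && pvPrevOk l i && pvNextOk l (i+5)) = true := by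
                simpa [and_assoc] using hne
              have hw5 := (false_cond_word l i hlt hc).2
              have h5 := slice_cons l i (i+5) hlt (by omega)
              rw [show i + 5 - i = 5 by omega, hw5] at h5
              injection h5 with h1 _
              rw [← h1] at hid'
              exact absurd hid' (by decide)
            have hside' : i + 1 < l.length → pvIdent (l.getD (i+1) ' ') = true →
                (i + 1 = 0 ∨ pvIdent (l.getD (i+1-1) ' ') = false) := by
              intro _ _
              right
              simp only [Nat.add_sub_cancel]
              rw [List.getD_eq_getElem l ' ' hlt]
              exact hid'
            have hih := ih (i+1) (by omega) sc (out ++ [l[i]]) hside'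
            rw [aLoop_step_copy l i sc out hlt hquote htf hff, hih,
                bScan_step_other l i out hlt hquote hid']
      · have hge : l.length ≤ i := by omega
        rw [aLoop_stop l i false sc false out hge, bScan_stop l i out hge]

-- ===== VERDICT (by name: the statement is the Claim_ definition above) =====
theorem convert_js_json_booleans_to_python_py_spec : Claim_equal_convert_js_json_booleans_to_python_py := by
  intro src _
  unfold Spec_convert_js_json_booleans_to_python_py
  unfold convert_js_json_booleans_to_python_py convert_js_json_booleans_to_python_py_alt
  split
  · rfl
  · exact congrArg String.mk (main_lemma src.toList src.toList.length 0 (by omega) ' ' []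
      (fun _ _ => Or.inl rfl))
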